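-- pv_equiv track=rewrite | github.com/Undefeated-man/AI_teaching_project | miniproject/questionRecord/audioRecognize.py | processPunctuation
-- ===== SOURCE A (Python) =====
-- def processPunctuation(sentences):
--     processedSentences = []
--     punctuation = '''!"#$%&()*+,-./:;<=>?@[\\]^_~'{|}'''
--     for sent in sentences:
--         for ch in punctuation:
--             sent = sent.replace(ch, "").lower()
--         processedSentences.append(sent)
--     return processedSentences
-- ===== SOURCE B (Python) =====
-- _PUNCT = frozenset('''!"#$%&()*+,-./:;<=>?@[\\]^_~'{|}''')
--
-- def processPunctuation(sentences):
--     return [''.join(c.lower() for c in sent if c not in _PUNCT) for sent in sentences]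
-- ===== Notes on version B (the rewrite author's own statement) =====
-- stated objective: faster
-- what changed: Replaces the 31 whole-string replace-then-lower scans per sentence with one single pass per sentence that filters punctuation via a frozenset and lowercases each kept character.
import Mathlib
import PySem

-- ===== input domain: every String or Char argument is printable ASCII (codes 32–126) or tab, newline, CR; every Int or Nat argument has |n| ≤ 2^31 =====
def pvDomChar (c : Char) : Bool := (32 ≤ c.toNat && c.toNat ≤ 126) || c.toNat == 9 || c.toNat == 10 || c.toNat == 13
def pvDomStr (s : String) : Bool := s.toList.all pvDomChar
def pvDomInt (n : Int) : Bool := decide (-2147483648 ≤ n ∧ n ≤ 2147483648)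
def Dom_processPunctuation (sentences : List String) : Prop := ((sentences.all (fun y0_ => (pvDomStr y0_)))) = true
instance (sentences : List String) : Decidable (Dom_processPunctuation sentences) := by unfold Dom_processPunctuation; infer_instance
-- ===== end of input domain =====

-- B replaces A's 31 repeated whole-string replace-then-lower scans per sentence
-- with a single filtering+lowercasing pass per sentence (objective: faster).


-- ===== PORT A =====
-- the characters of A's punctuation string constant, in order
def pvPunct : List Char :=
  ['!', '"', '#', '$', '%', '&', '(', ')', '*', '+', ',', '-', '.', '/',
   ':', ';', '<', '=', '>', '?', '@', '[', '\\', ']', '^', '_', '~', '\'', '{', '|', '}']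

def processPunctuation (sentences : List String) : List String :=
  sentences.foldl
    (fun processedSentences sent =>
      processedSentences ++
        [pvPunct.foldl (fun s ch => PySem.Str.lower (PySem.Str.replace s (String.ofList [ch]) "")) sent])
    []

-- ===== PORT B =====
-- the frozenset of punctuation characters
def pvPunctSet : PySem.Set Char := PySem.Set.ofList pvPunct

def processPunctuation_alt (sentences : List String) : List String :=
  sentences.map (fun sent =>
    String.ofList ((sent.toList.filter (fun c => !(pvPunctSet.contains c))).map PySem.Chars.lowerChar))

-- ===== PRECONDITION & SPEC =====
def Spec_processPunctuation (sentences : List String) (out : List String) : Prop := out = processPunctuation_alt sentences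
instance (sentences : List String) (out : List String) : Decidable (Spec_processPunctuation sentences out) := by unfold Spec_processPunctuation; infer_instance

-- ===== CLAIM (what is proved, stated in full; the proofs are below) =====
def Claim_equal_processPunctuation : Prop := ∀ (sentences : List String), Dom_processPunctuation sentences → Spec_processPunctuation sentences (processPunctuation sentences)

-- ===== LEMMAS AND PROOFS =====

-- replace with a single-character pattern and empty replacement is a filter
theorem replace_go_single (p : Char) :
    ∀ (fuel : Nat) (l acc : List Char), l.length ≤ fuel →
      PySem.Chars.replace.go [p] [] fuel l acc = acc.reverse ++ l.filter (fun c => c != p) := by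
  intro fuel
  induction fuel with
  | zero =>
    intro l acc h
    have : l = [] := List.length_eq_zero_iff.mp (Nat.le_zero.mp h)
    subst this
    rw [PySem.Chars.replace.go]
    simp
  | succ n ih =>
    intro l acc h
    cases l with
    | nil =>
      rw [PySem.Chars.replace.go]
      simp
      omega
    | cons c t =>
      rw [PySem.Chars.replace.go]
      simp only [List.length_cons] at h
      by_cases hc : (p == c) = true
      · have hpre : [p].isPrefixOf (c :: t) = true := by simp [List.isPrefixOf, hc]
        rw [if_pos hpre]
        simp only [List.length_cons, List.length_nil, Nat.zero_add, List.drop_succ_cons,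
          List.drop_zero, List.reverse_nil, List.nil_append]
        rw [ih t acc (by omega)]
        have hcp : (c != p) = false := by
          simp only [beq_iff_eq] at hc
          simp [bne, hc]
        simp [List.filter_cons, hcp]
      · have hpre : [p].isPrefixOf (c :: t) = false := by
          simp [List.isPrefixOf]
          simpa using hc
        rw [if_neg (by simp [hpre])]
        rw [ih t (c :: acc) (by omega)]
        have hcp : (c != p) = true := by
          simp only [beq_iff_eq] at hc
          simp [bne]
          exact fun h' => hc h'.symm
        simp [List.filter_cons, hcp]

theorem replace_single (p : Char) (l : List Char) :
    PySem.Chars.replace l [p] [] = l.filter (fun c => c != p) := by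
  rw [PySem.Chars.replace]
  simp only [List.isEmpty_cons, Bool.false_eq_true, if_neg, not_false_eq_true]
  simpa using replace_go_single p l.length l [] le_rfl

theorem upper_bounds (c : Char) (h : PySem.Chars.isupper c = true) :
    65 ≤ c.toNat ∧ c.toNat ≤ 90 := by
  simp only [PySem.Chars.isupper, Bool.and_eq_true, decide_eq_true_eq, Char.le_def] at h
  simpa using h

theorem lowerChar_toNat_of_upper (c : Char) (h : PySem.Chars.isupper c = true) :
    (PySem.Chars.lowerChar c).toNat = c.toNat + 32 := by
  have hb := upper_bounds c h
  have hv : (c.toNat + 32).isValidChar := Or.inl (by omega)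
  rw [PySem.Chars.lowerChar, if_pos h]
  simp [Char.ofNat, hv, Char.ofNatAux]
  omega

theorem lowerChar_eq_self (c : Char) (h : PySem.Chars.isupper c = false) :
    PySem.Chars.lowerChar c = c := by
  simp [PySem.Chars.lowerChar, h]

theorem isupper_eq_false_of_gt (c : Char) (h : 90 < c.toNat) :
    PySem.Chars.isupper c = false := by
  simp only [PySem.Chars.isupper, Bool.and_eq_false_iff, decide_eq_false_iff_not, Char.le_def]
  right
  simpa using h

theorem islower_of_bounds (c : Char) (h1 : 97 ≤ c.toNat) (h2 : c.toNat ≤ 122) :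
    PySem.Chars.islower c = true := by
  simp only [PySem.Chars.islower, Bool.and_eq_true, decide_eq_true_eq, Char.le_def]
  exact ⟨UInt32.le_iff_toNat_le.mpr h1, UInt32.le_iff_toNat_le.mpr h2⟩

theorem lowerChar_idem (c : Char) :
    PySem.Chars.lowerChar (PySem.Chars.lowerChar c) = PySem.Chars.lowerChar c := by
  by_cases h : PySem.Chars.isupper c = true
  · have hn := lowerChar_toNat_of_upper c h
    have hb := upper_bounds c h
    exact lowerChar_eq_self _ (isupper_eq_false_of_gt _ (by omega))
  · have h' : PySem.Chars.isupper c = false := by simpa using h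
    simp only [lowerChar_eq_self c h']

-- membership in a letter-free char list is unchanged by lowercasing
theorem contains_lowerChar (P : List Char) (hP : ∀ p ∈ P, PySem.Chars.isalpha p = false)
    (c : Char) : P.contains (PySem.Chars.lowerChar c) = P.contains c := by
  by_cases h : PySem.Chars.isupper c = true
  · have hb := upper_bounds c h
    have hn := lowerChar_toNat_of_upper c h
    have h1 : P.contains c = false := by
      by_contra hc
      have hm : c ∈ P := by
        have := Bool.of_not_eq_false hc
        simpa using this
      have := hP c hm
      simp [PySem.Chars.isalpha, h] at this
    have h2 : P.contains (PySem.Chars.lowerChar c) = false := by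
      by_contra hc
      have hm : PySem.Chars.lowerChar c ∈ P := by
        have := Bool.of_not_eq_false hc
        simpa using this
      have halpha := hP _ hm
      have hlow : PySem.Chars.islower (PySem.Chars.lowerChar c) = true :=
        islower_of_bounds _ (by omega) (by omega)
      simp [PySem.Chars.isalpha, hlow] at halpha
    rw [h1, h2]
  · have h' : PySem.Chars.isupper c = false := by simpa using h
    rw [lowerChar_eq_self c h']

-- A's inner loop over a nonempty letter-free punctuation list is one filter + lower
theorem foldl_step (P : List Char) (hne : P ≠ []) (hP : ∀ p ∈ P, PySem.Chars.isalpha p = false) :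
    ∀ (l : List Char),
      P.foldl (fun s p => PySem.Chars.lower (s.filter (fun c => c != p))) l
        = PySem.Chars.lower (l.filter (fun c => !(P.contains c))) := by
  induction P with
  | nil => exact absurd rfl hne
  | cons p P' ih =>
    intro l
    cases hP' : P' with
    | nil =>
      subst hP'
      simp only [List.foldl_cons, List.foldl_nil]
      congr 1
      apply List.filter_congr
      intro c _
      simp only [List.contains_cons, List.contains_nil, Bool.or_false, bne,
        Bool.beq_comm (a := c) (b := p)]
    | cons q Q =>
      have hne' : P' ≠ [] := by simp [hP']
      rw [← hP'] at *
      simp only [List.foldl_cons]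
      rw [ih hne' (fun x hx => hP x (List.mem_cons_of_mem _ hx))]
      simp only [PySem.Chars.lower]
      rw [List.filter_map, List.map_map]
      have hmapidem :
          List.map (PySem.Chars.lowerChar ∘ PySem.Chars.lowerChar)
              (List.filter ((fun c => !P'.contains c) ∘ PySem.Chars.lowerChar)
                (List.filter (fun c => c != p) l))
            = List.map PySem.Chars.lowerChar
              (List.filter ((fun c => !P'.contains c) ∘ PySem.Chars.lowerChar)
                (List.filter (fun c => c != p) l)) := by
        apply List.map_congr_left
        intro x _
        exact lowerChar_idem x
      rw [hmapidem]
      congr 1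
      rw [List.filter_filter]
      apply List.filter_congr
      intro c _
      have hcl := contains_lowerChar P' (fun x hx => hP x (List.mem_cons_of_mem _ hx)) c
      simp only [Function.comp, hcl, List.contains_cons, bne,
        Bool.beq_comm (a := c) (b := p)]
      cases hcp : (p == c) <;> cases hc : P'.contains c <;> rfl

-- bridge A's string-level inner loop to the list level
theorem toList_foldA :
    ∀ (P : List Char) (s : String),
      (P.foldl (fun s ch => PySem.Str.lower (PySem.Str.replace s (String.ofList [ch]) "")) s).toList
        = P.foldl (fun l p => PySem.Chars.lower (l.filter (fun c => c != p))) s.toList := by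
  intro P
  induction P with
  | nil => intro s; simp
  | cons p P' ih =>
    intro s
    simp only [List.foldl_cons]
    rw [ih]
    have h3 : (PySem.Str.lower (PySem.Str.replace s (String.ofList [p]) "")).toList
        = PySem.Chars.lower (s.toList.filter (fun c => c != p)) := by
      rw [PySem.Str.toList_lower, PySem.Str.toList_replace]
      have h1 : (String.ofList [p]).toList = [p] := by simp
      have h2 : ("" : String).toList = [] := by decide
      rw [h1, h2, replace_single]
    rw [h3]

theorem punct_not_alpha : ∀ p ∈ pvPunct, PySem.Chars.isalpha p = false := by
  intro p hp
  fin_cases hp <;> rfl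

theorem punctSet_eq : pvPunctSet = pvPunct := by rfl

theorem sentence_eq (s : String) :
    pvPunct.foldl (fun s ch => PySem.Str.lower (PySem.Str.replace s (String.ofList [ch]) "")) s
      = String.ofList ((s.toList.filter (fun c => !(pvPunctSet.contains c))).map PySem.Chars.lowerChar) := by
  apply String.toList_inj.mp
  rw [toList_foldA, foldl_step pvPunct (by simp [pvPunct]) punct_not_alpha]
  have hc : ∀ c, PySem.Set.contains pvPunctSet c = pvPunct.contains c := by
    intro c
    rw [punctSet_eq]
    rfl
  simp only [PySem.Chars.lower, String.toList_ofList, hc]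

theorem foldl_append_map (f : String → String) :
    ∀ (l : List String) (acc : List String),
      l.foldl (fun a s => a ++ [f s]) acc = acc ++ l.map f := by
  intro l
  induction l with
  | nil => intro acc; simp
  | cons x xs ih => intro acc; simp [ih]

-- ===== VERDICT (by name: the statement is the Claim_ definition above) =====
theorem processPunctuation_spec : Claim_equal_processPunctuation := by
  intro sentences _
  unfold Spec_processPunctuation processPunctuation processPunctuation_alt
  rw [foldl_append_map]
  simp only [List.nil_append]
  apply List.map_congr_left
  intro s _
  exact sentence_eq s
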